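-- pv_equiv track=rewrite | github.com/McKWDean/cdk-greedy-function-search | FunctionSequencing.py | _reorder_sequence_with_workflow_pullup
-- ===== SOURCE A (Python) =====
-- from collections import deque
-- from typing import Tuple, List, Set, Dict, Optional
--
-- def _reorder_sequence_with_workflow_pullup(
--     ordered_functions: List[str],
--     workflow_map: Dict[str, str],
--     threshold: int = 3,
-- ) -> List[str]:
--     """
--     If a function has fewer than `threshold` other same-workflow functions later in the
--     sequence, pull those up to be immediately after it. Modifies only the order.
--     """
--     if not ordered_functions or threshold <= 0:
--         return list(ordered_functions)
--     remaining = deque(ordered_functions)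
--     new_order: List[str] = []
--     while remaining:
--         f = remaining.popleft()
--         f_upper = str(f).strip().upper() if f else ""
--         w = workflow_map.get(f_upper, "")
--         trailing = [x for x in remaining if workflow_map.get(str(x).strip().upper() if x else "", "") == w]
--         if 1 <= len(trailing) < threshold:
--             new_order.append(f)
--             new_order.extend(trailing)
--             trailing_set = set(trailing)
--             remaining = deque(x for x in remaining if x not in trailing_set)
--         else:
--             new_order.append(f)
--     return new_order
-- ===== SOURCE B (Python) =====
-- from collections import deque
-- from typing import List, Dict
--
--
-- def _reorder_sequence_with_workflow_pullup(
--     ordered_functions: List[str],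
--     workflow_map: Dict[str, str],
--     threshold: int = 3,
-- ) -> List[str]:
--     """O(n): pre-group the items by workflow once, then emit in one pass,
--     flushing a workflow's whole queue the first time its trailing count
--     drops below `threshold`."""
--     if not ordered_functions or threshold <= 0:
--         return list(ordered_functions)
--
--     def key(x: str) -> str:
--         return workflow_map.get(x.strip().upper() if x else "", "")
--
--     queues: Dict[str, deque] = {}
--     for x in ordered_functions:
--         queues.setdefault(key(x), deque()).append(x)
--
--     done = set()
--     out: List[str] = []
--     for f in ordered_functions:
--         w = key(f)
--         if w in done:
--             continue
--         q = queues[w]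
--         q.popleft()  # f itself
--         if 1 <= len(q) < threshold:
--             out.append(f)
--             out.extend(q)
--             done.add(w)
--         else:
--             out.append(f)
--     return out
-- ===== Notes on version B (the rewrite author's own statement) =====
-- stated objective: faster
-- what changed: Instead of rescanning and rebuilding the remaining deque for every emitted item, B groups the items into per-workflow FIFO queues in one preliminary pass and then emits in a single pass over the original order, flushing a workflow's whole queue the first time its trailing count drops below the threshold and skipping its items thereafter.
import Mathlib
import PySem

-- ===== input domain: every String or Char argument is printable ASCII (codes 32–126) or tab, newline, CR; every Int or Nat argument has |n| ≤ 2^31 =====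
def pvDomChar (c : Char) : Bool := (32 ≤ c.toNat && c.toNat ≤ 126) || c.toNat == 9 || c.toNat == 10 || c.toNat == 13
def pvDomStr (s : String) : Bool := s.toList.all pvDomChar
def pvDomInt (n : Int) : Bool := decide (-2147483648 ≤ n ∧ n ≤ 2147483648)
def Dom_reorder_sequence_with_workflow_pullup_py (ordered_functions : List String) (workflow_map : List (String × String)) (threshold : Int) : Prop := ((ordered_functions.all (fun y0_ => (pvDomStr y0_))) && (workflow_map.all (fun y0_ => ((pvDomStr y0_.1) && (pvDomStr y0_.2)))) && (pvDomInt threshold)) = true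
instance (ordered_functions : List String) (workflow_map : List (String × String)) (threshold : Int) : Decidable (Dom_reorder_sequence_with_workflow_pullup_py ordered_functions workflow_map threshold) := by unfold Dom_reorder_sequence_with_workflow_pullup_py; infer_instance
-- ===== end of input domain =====

-- B replaces A's quadratic rescans of the remaining deque by one up-front grouping of the
-- items into per-workflow queues plus a single emitting pass (objective: faster).

-- ===== PORT A =====
-- shared helper: the workflow key Python computes for an item
-- (`workflow_map.get(x.strip().upper() if x else "", "")`, first-match dict lookup)
def pvKey (workflow_map : List (String × String)) (x : String) : String :=
  (PySem.Dict.mk workflow_map).getD (if x = "" then "" else PySem.Str.upper (PySem.Str.strip x)) ""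

-- the `while remaining:` loop of A, state = (remaining, new_order)
def pvAGo (workflow_map : List (String × String)) (threshold : Int) :
    List String → List String → List String
  | [], new_order => new_order
  | f :: remaining, new_order =>
    let w := pvKey workflow_map f
    let trailing := remaining.filter (fun x => pvKey workflow_map x == w)
    if 1 ≤ (trailing.length : Int) ∧ (trailing.length : Int) < threshold then
      let trailing_set := PySem.Set.ofList trailing
      pvAGo workflow_map threshold
        (remaining.filter (fun x => !(PySem.Set.contains trailing_set x)))
        (new_order ++ f :: trailing)
    else
      pvAGo workflow_map threshold remaining (new_order ++ [f])
termination_by remaining => remaining.length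
decreasing_by
  · exact Nat.lt_succ_of_le (by simpa using List.length_filter_le _ remaining.attach)
  · exact Nat.lt_succ_self _

def reorder_sequence_with_workflow_pullup_py (ordered_functions : List String) (workflow_map : List (String × String)) (threshold : Int) : List String :=
  if ordered_functions = [] ∨ threshold ≤ 0 then ordered_functions
  else pvAGo workflow_map threshold ordered_functions []

-- ===== PORT B =====
-- the emitting pass of B, state = (queues, done, out)
def pvBGo (workflow_map : List (String × String)) (threshold : Int) :
    List String → PySem.Dict String (List String) → PySem.Set String → List String → List String
  | [], _, _, out => out
  | f :: l, queues, done, out =>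
    let w := pvKey workflow_map f
    if PySem.Set.contains done w then
      pvBGo workflow_map threshold l queues done out
    else
      let q := (queues.getD w []).tail      -- q.popleft(): f itself leaves its queue
      let queues' := queues.insert w q
      if 1 ≤ (q.length : Int) ∧ (q.length : Int) < threshold then
        pvBGo workflow_map threshold l queues' (PySem.Set.add done w) (out ++ f :: q)
      else
        pvBGo workflow_map threshold l queues' done (out ++ [f])

def reorder_sequence_with_workflow_pullup_py_alt (ordered_functions : List String) (workflow_map : List (String × String)) (threshold : Int) : List String :=
  if ordered_functions = [] ∨ threshold ≤ 0 then ordered_functions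
  else
    let queues := ordered_functions.foldl
      (fun d x => d.modify (pvKey workflow_map x) [] (· ++ [x])) PySem.Dict.empty
    pvBGo workflow_map threshold ordered_functions queues PySem.Set.empty []

-- ===== PRECONDITION & SPEC =====
def Spec_reorder_sequence_with_workflow_pullup_py (ordered_functions : List String) (workflow_map : List (String × String)) (threshold : Int) (out : List String) : Prop := out = reorder_sequence_with_workflow_pullup_py_alt ordered_functions workflow_map threshold
instance (ordered_functions : List String) (workflow_map : List (String × String)) (threshold : Int) (out : List String) : Decidable (Spec_reorder_sequence_with_workflow_pullup_py ordered_functions workflow_map threshold out) := by unfold Spec_reorder_sequence_with_workflow_pullup_py; infer_instance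

-- ===== CLAIM (what is proved, stated in full; the proofs are below) =====
def Claim_equal_reorder_sequence_with_workflow_pullup_py : Prop := ∀ (ordered_functions : List String) (workflow_map : List (String × String)) (threshold : Int), Dom_reorder_sequence_with_workflow_pullup_py ordered_functions workflow_map threshold → Spec_reorder_sequence_with_workflow_pullup_py ordered_functions workflow_map threshold (reorder_sequence_with_workflow_pullup_py ordered_functions workflow_map threshold)

-- ===== LEMMAS AND PROOFS =====

-- B's grouping loop: each queue holds exactly the items of its workflow, in order.
theorem pvQueue_build (wm : List (String × String)) (l : List String)
    (d : PySem.Dict String (List String)) (w : String) :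
    (l.foldl (fun d x => d.modify (pvKey wm x) [] (· ++ [x])) d).getD w []
      = d.getD w [] ++ l.filter (fun x => pvKey wm x == w) := by
  induction l generalizing d with
  | nil => simp
  | cons f l ih =>
    simp only [List.foldl_cons, List.filter_cons, ih]
    rw [PySem.Dict.getD_modify]
    by_cases h : w = pvKey wm f
    · simp [h, List.append_assoc]
    · have : (pvKey wm f == w) = false := by simp [Ne.symm h]
      simp [h, this]

-- A's set-based deque rebuild removes exactly the items the predicate selected.
theorem pvSet_filter (rem t : List String) (p : String → Bool)
    (h : ∀ x ∈ rem, (x ∈ t ↔ p x = true)) :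
    rem.filter (fun x => !(PySem.Set.contains (PySem.Set.ofList t) x))
      = rem.filter (fun x => !(p x)) := by
  apply List.filter_congr
  intro x hx
  rcases Bool.eq_false_or_eq_true (p x) with hp | hp
  · have hc : PySem.Set.contains (PySem.Set.ofList t) x = true :=
      (PySem.Set.contains_iff _ _).2 ((PySem.Set.mem_ofList _ _).2 ((h x hx).2 hp))
    rw [hc, hp]
  · have hm : x ∉ PySem.Set.ofList t := fun hm => by
      have h2 := (h x hx).1 ((PySem.Set.mem_ofList _ _).1 hm)
      rw [h2] at hp; cases hp
    have hc : PySem.Set.contains (PySem.Set.ofList t) x = false := by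
      by_contra hcc
      exact hm ((PySem.Set.contains_iff _ _).1 (by simpa using hcc))
    rw [hc, hp]

-- Main loop invariant: A over the not-yet-pulled remainder = B over the raw suffix.
theorem pvMain (wm : List (String × String)) (th : Int) (l : List String)
    (Q : PySem.Dict String (List String)) (done : PySem.Set String) (out : List String)
    (hQ : ∀ w, PySem.Set.contains done w = false →
      Q.getD w [] = l.filter (fun x => pvKey wm x == w)) :
    pvAGo wm th (l.filter (fun x => !(PySem.Set.contains done (pvKey wm x)))) out
      = pvBGo wm th l Q done out := by
  induction l generalizing Q done out with
  | nil => simp [pvAGo, pvBGo]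
  | cons f l ih =>
    simp only [List.filter_cons, pvBGo]
    by_cases hf : PySem.Set.contains done (pvKey wm f) = true
    · rw [hf]
      simp only [Bool.not_true, Bool.false_eq_true, if_false, if_true]
      rw [ih Q done out]
      intro w hw
      have hne : (pvKey wm f == w) = false := by
        simp only [beq_eq_false_iff_ne, ne_eq]
        intro h; rw [h] at hf; rw [hf] at hw; cases hw
      have := hQ w hw
      rwa [List.filter_cons, hne, if_neg (by simp)] at this
    · simp only [Bool.not_eq_true] at hf
      rw [hf]
      simp only [Bool.not_false, Bool.false_eq_true, if_true, if_false]
      rw [pvAGo]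
      have hfmem : pvKey wm f ∉ done := fun hm => by
        rw [(PySem.Set.contains_iff _ _).2 hm] at hf; cases hf
      have hkeyf : (pvKey wm f == pvKey wm f) = true := by simp
      have htrail :
          (l.filter (fun x => !(PySem.Set.contains done (pvKey wm x)))).filter
              (fun x => pvKey wm x == pvKey wm f)
            = l.filter (fun x => pvKey wm x == pvKey wm f) := by
        rw [List.filter_filter]
        apply List.filter_congr
        intro x _
        by_cases h : pvKey wm x = pvKey wm f
        · simp [h, hfmem]
        · simp [h]
      have hq : (Q.getD (pvKey wm f) []).tail
          = l.filter (fun x => pvKey wm x == pvKey wm f) := by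
        rw [hQ _ hf, List.filter_cons, hkeyf]; simp
      simp only [htrail, hq]
      by_cases hc : 1 ≤ ((l.filter (fun x => pvKey wm x == pvKey wm f)).length : Int)
          ∧ ((l.filter (fun x => pvKey wm x == pvKey wm f)).length : Int) < th
      · rw [if_pos hc, if_pos hc]
        rw [pvSet_filter _ _ (fun x => pvKey wm x == pvKey wm f)
          (by
            intro x hx
            rw [List.mem_filter]
            constructor
            · rintro ⟨_, h2⟩; exact h2
            · intro h2; exact ⟨(List.mem_filter.1 hx).1, h2⟩)]
        have hcomb :
            (l.filter (fun x => !(PySem.Set.contains done (pvKey wm x)))).filter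
                (fun x => !(pvKey wm x == pvKey wm f))
              = l.filter (fun x =>
                  !(PySem.Set.contains (PySem.Set.add done (pvKey wm f)) (pvKey wm x))) := by
          rw [List.filter_filter]
          apply List.filter_congr
          intro x _
          by_cases hnd : PySem.Set.contains done (pvKey wm x) = true
          · have h1 : PySem.Set.contains (PySem.Set.add done (pvKey wm f)) (pvKey wm x) = true :=
              (PySem.Set.contains_iff _ _).2 ((PySem.Set.mem_add _ _ _).2
                (Or.inl ((PySem.Set.contains_iff _ _).1 hnd)))
            rw [hnd, h1]; simp
          · simp only [Bool.not_eq_true] at hnd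
            by_cases hnw : pvKey wm x = pvKey wm f
            · have h1 : PySem.Set.contains (PySem.Set.add done (pvKey wm f)) (pvKey wm x) = true :=
                (PySem.Set.contains_iff _ _).2 ((PySem.Set.mem_add _ _ _).2 (Or.inr hnw))
              rw [hnd, h1]; simp [hnw]
            · have h1 : PySem.Set.contains (PySem.Set.add done (pvKey wm f)) (pvKey wm x) = false := by
                by_contra hcc
                simp only [Bool.not_eq_false] at hcc
                rcases (PySem.Set.mem_add _ _ _).1 ((PySem.Set.contains_iff _ _).1 hcc) with h2 | h2
                · rw [(PySem.Set.contains_iff _ _).2 h2] at hnd; cases hnd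
                · exact hnw h2
              rw [hnd, h1]
              simp [hnw]
        rw [hcomb]
        rw [ih]
        intro w hw
        have hwne : w ≠ pvKey wm f := by
          intro h
          rw [h, (PySem.Set.contains_iff _ _).2
            ((PySem.Set.mem_add _ _ _).2 (Or.inr rfl))] at hw
          cases hw
        have hwd : PySem.Set.contains done w = false := by
          by_contra hcd
          simp only [Bool.not_eq_false] at hcd
          rw [(PySem.Set.contains_iff _ _).2
            ((PySem.Set.mem_add _ _ _).2 (Or.inl ((PySem.Set.contains_iff _ _).1 hcd)))] at hw
          cases hw
        rw [PySem.Dict.getD_insert, if_neg hwne, hQ w hwd, List.filter_cons,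
          if_neg (by simp [Ne.symm hwne])]
      · rw [if_neg hc, if_neg hc]
        rw [ih]
        intro w hw
        rw [PySem.Dict.getD_insert]
        by_cases hww : w = pvKey wm f
        · rw [if_pos hww, hww]
        · rw [if_neg hww, hQ w hw, List.filter_cons, if_neg (by simp [Ne.symm hww])]

-- ===== VERDICT (by name: the statement is the Claim_ definition above) =====
theorem reorder_sequence_with_workflow_pullup_py_spec : Claim_equal_reorder_sequence_with_workflow_pullup_py := by
  intro ofs wm th _
  unfold Spec_reorder_sequence_with_workflow_pullup_py
  unfold reorder_sequence_with_workflow_pullup_py reorder_sequence_with_workflow_pullup_py_alt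
  by_cases h : ofs = [] ∨ th ≤ 0
  · rw [if_pos h, if_pos h]
  · rw [if_neg h, if_neg h]
    rw [← pvMain wm th ofs _ PySem.Set.empty []]
    · congr 1
      exact (List.filter_eq_self.2 (fun x _ => by
        simp [PySem.Set.empty, PySem.Set.contains])).symm
    · intro w _
      rw [pvQueue_build]
      simp
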